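-- pv_equiv track=rewrite | github.com/thaddeuspearson/LS-PY101 | Small_Problems/Easy_1/sum_or_product_of_consecutive_integers/sum_or_product_of_consecutive_integers.py | calculate_sum_or_product
-- ===== SOURCE A (Python) =====
-- def calculate_sum_or_product(target_int, sum_or_product_choice):
--     """Calcualtes the sum or product from 1 until the given product
--
--     :target_int (int): an integer value to sum or product until
--     :sum_or_product (str): "sum"/"product" indicating which op to perform
--     :returns result (int): the result of the chosen operation
--     """
--     values_list = list(range(1, target_int+1))
--     match sum_or_product_choice:
--         case "sum":
--             result = sum(values_list)
--         case "product":
--             result = 1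
--             for num in values_list:
--                 result *= num
--     return result
-- ===== SOURCE B (Python) =====
-- def calculate_sum_or_product(target_int, sum_or_product_choice):
--     """Sum 1..n via the Gauss closed form; product 1..n via a countdown factorial loop."""
--     if sum_or_product_choice == "sum":
--         return target_int * (target_int + 1) // 2 if target_int > 0 else 0
--     if sum_or_product_choice == "product":
--         result = 1
--         k = target_int
--         while k > 1:
--             result *= k
--             k -= 1
--         return result
--     raise ValueError("choice must be 'sum' or 'product'")
-- ===== Notes on version B (the rewrite author's own statement) =====
-- stated objective: faster
-- what changed: The sum branch is replaced by the Gauss closed form n*(n+1)//2 (O(1) instead of building and summing a list), and the product branch multiplies down from n in a while loop without materialising the range list.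
import Mathlib
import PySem

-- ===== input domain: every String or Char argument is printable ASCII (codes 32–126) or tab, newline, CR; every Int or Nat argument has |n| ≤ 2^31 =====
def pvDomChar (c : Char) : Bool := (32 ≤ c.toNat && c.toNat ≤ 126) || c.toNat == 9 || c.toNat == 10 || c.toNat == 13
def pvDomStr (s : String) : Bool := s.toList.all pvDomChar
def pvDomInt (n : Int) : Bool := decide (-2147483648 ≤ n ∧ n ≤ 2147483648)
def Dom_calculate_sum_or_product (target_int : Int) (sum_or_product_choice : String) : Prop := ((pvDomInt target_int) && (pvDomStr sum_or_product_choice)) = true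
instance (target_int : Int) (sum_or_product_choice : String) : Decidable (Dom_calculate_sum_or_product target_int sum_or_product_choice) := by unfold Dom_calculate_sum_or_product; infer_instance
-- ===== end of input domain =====

-- B changes the sum branch to the Gauss closed form and the product branch to a
-- countdown multiply loop without materialising the range list (objective: faster).

-- ===== PORT A =====
-- values_list = list(range(1, target_int+1)); match on the choice; sum via sum(),
-- product via a left-to-right accumulating loop. On an unmatched choice A raises
-- UnboundLocalError; the port returns 0 there and Pre_ excludes those inputs.
def calculate_sum_or_product (target_int : Int) (sum_or_product_choice : String) : Int :=
  let values_list := PySem.List.pyRange 1 (target_int + 1) 1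
  if sum_or_product_choice = "sum" then
    values_list.foldl (· + ·) 0
  else if sum_or_product_choice = "product" then
    values_list.foldl (fun result num => result * num) 1
  else 0

-- ===== PORT B =====
-- while k > 1: result *= k; k -= 1   (countdown factorial loop)
def pvProdDown (result : Int) (k : Int) : Int :=
  if h : k > 1 then pvProdDown (result * k) (k - 1) else result
termination_by k.toNat
decreasing_by omega

-- B raises ValueError on an unmatched choice; the port returns 0 there and Pre_ excludes it.
def calculate_sum_or_product_alt (target_int : Int) (sum_or_product_choice : String) : Int :=
  if sum_or_product_choice = "sum" then
    if target_int > 0 then PySem.Int.floordiv (target_int * (target_int + 1)) 2 else 0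
  else if sum_or_product_choice = "product" then
    pvProdDown 1 target_int
  else 0

-- ===== PRECONDITION & SPEC =====
-- A raises UnboundLocalError (and B raises ValueError) on any choice other than
-- "sum"/"product": exactly those inputs are excluded.
def Pre_calculate_sum_or_product (target_int : Int) (sum_or_product_choice : String) : Prop :=
  sum_or_product_choice = "sum" ∨ sum_or_product_choice = "product"
instance (target_int : Int) (sum_or_product_choice : String) : Decidable (Pre_calculate_sum_or_product target_int sum_or_product_choice) := by unfold Pre_calculate_sum_or_product; infer_instance

def pvWitness_calculate_sum_or_product : Int × String := (5, "product")

def Spec_calculate_sum_or_product (target_int : Int) (sum_or_product_choice : String) (out : Int) : Prop := out = calculate_sum_or_product_alt target_int sum_or_product_choice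
instance (target_int : Int) (sum_or_product_choice : String) (out : Int) : Decidable (Spec_calculate_sum_or_product target_int sum_or_product_choice out) := by unfold Spec_calculate_sum_or_product; infer_instance

-- ===== CLAIM (what is proved, stated in full; the proofs are below) =====
def Claim_equal_calculate_sum_or_product : Prop := ∀ (target_int : Int) (sum_or_product_choice : String), Dom_calculate_sum_or_product target_int sum_or_product_choice → Pre_calculate_sum_or_product target_int sum_or_product_choice → Spec_calculate_sum_or_product target_int sum_or_product_choice (calculate_sum_or_product target_int sum_or_product_choice)

-- ===== LEMMAS AND PROOFS =====

-- the triangular number 1 + 2 + ... + m, as the recursion the sum loop follows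
def pvTri : Nat → Int
  | 0 => 0
  | n + 1 => pvTri n + (n + 1)

lemma pvTri_two_mul (m : Nat) : 2 * pvTri m = (m : Int) * (m + 1) := by
  induction m with
  | zero => simp [pvTri]
  | succ n ih => simp only [pvTri]; push_cast; linarith

-- A's sum loop over range(1, m+1) equals r plus the triangular number.
lemma foldl_add_pyRange (m : Nat) : ∀ r : Int,
    (PySem.List.pyRange 1 ((m : Int) + 1) 1).foldl (· + ·) r = r + pvTri m := by
  induction m with
  | zero => intro r; rw [PySem.List.pyRange_one_eq_nil (by omega)]; simp [pvTri]
  | succ n ih =>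
      intro r
      have h : (((n + 1 : Nat) : Int) + 1) = ((n : Int) + 1) + 1 := by push_cast; ring
      rw [h, PySem.List.pyRange_one_succ_right (by omega), List.foldl_append, ih]
      simp [pvTri]; ring

-- A's product loop over range(1, m+1) equals r * m!.
lemma foldl_mul_pyRange (m : Nat) : ∀ r : Int,
    (PySem.List.pyRange 1 ((m : Int) + 1) 1).foldl (fun result num => result * num) r
      = r * (Nat.factorial m : Int) := by
  induction m with
  | zero => intro r; rw [PySem.List.pyRange_one_eq_nil (by omega)]; simp [Nat.factorial]
  | succ n ih =>
      intro r
      have h : (((n + 1 : Nat) : Int) + 1) = ((n : Int) + 1) + 1 := by push_cast; ring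
      rw [h, PySem.List.pyRange_one_succ_right (by omega), List.foldl_append, ih]
      simp [Nat.factorial]; ring

-- B's countdown loop also computes r * m!.
lemma pvProdDown_eq (m : Nat) : ∀ r : Int, pvProdDown r (m : Int) = r * (Nat.factorial m : Int) := by
  induction m with
  | zero => intro r; rw [pvProdDown]; simp [Nat.factorial]
  | succ n ih =>
      intro r
      rw [pvProdDown]
      by_cases hn : n = 0
      · subst hn; simp [Nat.factorial]
      · have h1 : ((n + 1 : Nat) : Int) > 1 := by omega
        have h2 : ((n + 1 : Nat) : Int) - 1 = (n : Int) := by push_cast; ring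
        rw [dif_pos h1, h2, ih]
        simp [Nat.factorial]; push_cast; ring

lemma pvProdDown_nonpos (k : Int) (hk : k ≤ 1) : pvProdDown 1 k = 1 := by
  rw [pvProdDown]; simp [not_lt.mpr hk]

-- ===== VERDICT (by name: the statement is the Claim_ definition above) =====
theorem calculate_sum_or_product_spec : Claim_equal_calculate_sum_or_product := by
  intro n s _ hpre
  unfold Spec_calculate_sum_or_product calculate_sum_or_product calculate_sum_or_product_alt
  rcases hpre with hs | hs <;> subst hs <;> simp
  · -- sum branch
    by_cases hn : n > 0
    · have hrep : n = ((n.toNat : Nat) : Int) := by omega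
      rw [if_pos hn, hrep, foldl_add_pyRange n.toNat 0, ← pvTri_two_mul n.toNat]
      omega
    · rw [if_neg hn, PySem.List.pyRange_one_eq_nil (by omega)]; rfl
  · -- product branch
    by_cases hn : n > 0
    · have hrep : n = ((n.toNat : Nat) : Int) := by omega
      rw [hrep, foldl_mul_pyRange n.toNat 1, pvProdDown_eq n.toNat 1]
    · rw [PySem.List.pyRange_one_eq_nil (by omega), pvProdDown_nonpos n (by omega)]; rfl
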